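-- pv_equiv track=rewrite | github.com/lishehao/RPG_Demo | rpg_backend/author/planning.py | _progress_schedule
-- ===== SOURCE A (Python) =====
-- def _progress_schedule(target_turn_count: int, target_beat_count: int) -> list[int]:
--     schedule = [target_turn_count // target_beat_count] * target_beat_count
--     remainder = target_turn_count % target_beat_count
--     for index in range(target_beat_count - 1, -1, -1):
--         if remainder <= 0:
--             break
--         schedule[index] += 1
--         remainder -= 1
--     return [max(1, min(3, value)) for value in schedule]
-- ===== SOURCE B (Python) =====
-- def _progress_schedule(target_turn_count: int, target_beat_count: int) -> list[int]:
--     # Sequential fair-division greedy: each beat takes floor(remaining / beats_left),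
--     # which provably yields the balanced split with the larger parts at the end.
--     out = []
--     remaining = target_turn_count
--     beats_left = target_beat_count
--     while beats_left > 0:
--         share = remaining // beats_left
--         out.append(max(1, min(3, share)))
--         remaining -= share
--         beats_left -= 1
--     return out
-- ===== Notes on version B (the rewrite author's own statement) =====
-- stated objective: alternative
-- what changed: Replaces A's base/remainder arithmetic (uniform list build plus backward countdown mutation, then a clamping pass) with a sequential fair-division greedy that never computes the remainder: one pass where each beat takes floor(remaining/beats_left) of the still-undistributed turns, clamped as it is emitted.
import Mathlib
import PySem

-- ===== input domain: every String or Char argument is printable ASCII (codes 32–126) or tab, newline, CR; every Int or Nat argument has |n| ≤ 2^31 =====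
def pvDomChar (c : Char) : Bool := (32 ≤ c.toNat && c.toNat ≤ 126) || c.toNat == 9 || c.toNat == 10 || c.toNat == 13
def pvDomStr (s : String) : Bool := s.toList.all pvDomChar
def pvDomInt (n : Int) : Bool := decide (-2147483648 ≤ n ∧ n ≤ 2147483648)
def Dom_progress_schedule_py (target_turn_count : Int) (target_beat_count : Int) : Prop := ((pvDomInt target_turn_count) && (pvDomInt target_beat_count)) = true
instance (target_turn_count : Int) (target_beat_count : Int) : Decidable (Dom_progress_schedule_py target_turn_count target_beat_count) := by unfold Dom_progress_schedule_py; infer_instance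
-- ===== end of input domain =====

-- B replaces A's base/remainder arithmetic (uniform list + backward countdown
-- mutation + clamping pass) with a sequential fair-division greedy: each beat
-- takes floor(remaining/beats_left), clamped as emitted (objective: alternative).

-- ===== PORT A =====
-- schedule[index] += 1 (index is always nonnegative and in range here)
def pvIncAt : List Int → Nat → List Int
  | [], _ => []
  | x :: xs, 0 => (x + 1) :: xs
  | x :: xs, n + 1 => x :: pvIncAt xs n

-- the countdown for-loop with its break
def pvLoopA : List Int → List Int → Int → List Int
  | [], sched, _ => sched
  | i :: rest, sched, rem =>
      if rem ≤ 0 then sched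
      else pvLoopA rest (pvIncAt sched i.toNat) (rem - 1)

def progress_schedule_py (target_turn_count : Int) (target_beat_count : Int) : List Int :=
  -- [q] * n is empty for n ≤ 0, hence the toNat
  let schedule := List.replicate target_beat_count.toNat
      (PySem.Int.floordiv target_turn_count target_beat_count)
  let remainder := PySem.Int.mod target_turn_count target_beat_count
  let sched := pvLoopA (PySem.List.pyRange (target_beat_count - 1) (-1) (-1)) schedule remainder
  sched.map (fun value => max 1 (min 3 value))

-- ===== PORT B =====
-- the while loop: state is (beats_left, remaining); out is built head-first
def pvLoopB : Nat → Int → List Int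
  | 0, _ => []
  | m + 1, remaining =>
      let share := PySem.Int.floordiv remaining ((m : Int) + 1)
      max 1 (min 3 share) :: pvLoopB m (remaining - share)

def progress_schedule_py_alt (target_turn_count : Int) (target_beat_count : Int) : List Int :=
  pvLoopB target_beat_count.toNat target_turn_count

-- ===== PRECONDITION & SPEC =====
-- target_beat_count = 0 is excluded: A raises ZeroDivisionError there (B returns []).
def Pre_progress_schedule_py (target_turn_count : Int) (target_beat_count : Int) : Prop :=
  target_beat_count ≠ 0
instance (target_turn_count : Int) (target_beat_count : Int) : Decidable (Pre_progress_schedule_py target_turn_count target_beat_count) := by unfold Pre_progress_schedule_py; infer_instance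
def pvWitness_progress_schedule_py : Int × Int := (7, 3)

def Spec_progress_schedule_py (target_turn_count : Int) (target_beat_count : Int) (out : List Int) : Prop := out = progress_schedule_py_alt target_turn_count target_beat_count
instance (target_turn_count : Int) (target_beat_count : Int) (out : List Int) : Decidable (Spec_progress_schedule_py target_turn_count target_beat_count out) := by unfold Spec_progress_schedule_py; infer_instance

-- ===== CLAIM (what is proved, stated in full; the proofs are below) =====
def Claim_equal_progress_schedule_py : Prop := ∀ (target_turn_count : Int) (target_beat_count : Int), Dom_progress_schedule_py target_turn_count target_beat_count → Pre_progress_schedule_py target_turn_count target_beat_count → Spec_progress_schedule_py target_turn_count target_beat_count (progress_schedule_py target_turn_count target_beat_count)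

-- ===== LEMMAS AND PROOFS =====
lemma pvIncAt_length (l : List Int) (n : Nat) : (pvIncAt l n).length = l.length := by
  induction l generalizing n with
  | nil => rfl
  | cons a t ih => cases n <;> simp [pvIncAt, ih]

lemma pvIncAt_concat (l : List Int) (x : Int) : pvIncAt (l ++ [x]) l.length = l ++ [x + 1] := by
  induction l with
  | nil => simp [pvIncAt]
  | cons a t ih => simpa [pvIncAt] using ih

lemma pvIncAt_append_left (l t : List Int) (n : Nat) (h : n < l.length) :
    pvIncAt (l ++ t) n = pvIncAt l n ++ t := by
  induction l generalizing n with
  | nil => simp at h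
  | cons a tl ih =>
      cases n with
      | zero => simp [pvIncAt]
      | succ m =>
          simp only [List.cons_append, pvIncAt, List.cons.injEq, true_and]
          exact ih m (by simpa using Nat.lt_of_succ_lt_succ h)

lemma pvLoopA_append (idxs : List Int) (l t : List Int) (r : Int)
    (h : ∀ i ∈ idxs, 0 ≤ i ∧ i.toNat < l.length) :
    pvLoopA idxs (l ++ t) r = pvLoopA idxs l r ++ t := by
  induction idxs generalizing l r with
  | nil => rfl
  | cons i rest ih =>
      by_cases hr : r ≤ 0
      · simp [pvLoopA, hr]
      · have hi := h i (by simp)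
        simp only [pvLoopA, if_neg hr]
        rw [pvIncAt_append_left l t i.toNat hi.2, ih]
        intro j hj
        have hj' := h j (List.mem_cons_of_mem _ hj)
        rw [pvIncAt_length]
        exact hj'

lemma pvLoopA_desc (n : Nat) (l : List Int) (r : Int)
    (hl : l.length = n) (hr0 : 0 ≤ r) (hrn : r ≤ (n : Int)) :
    pvLoopA (PySem.List.pyRange ((n : Int) - 1) (-1) (-1)) l r
      = l.take (n - r.toNat) ++ (l.drop (n - r.toNat)).map (· + 1) := by
  induction n generalizing l r with
  | zero =>
      have hnil : l = [] := List.eq_nil_of_length_eq_zero hl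
      subst hnil
      rw [PySem.List.pyRange_neg_one_eq_nil (by norm_num)]
      simp [pvLoopA]
  | succ n ih =>
      have harith : ((n + 1 : Nat) : Int) - 1 = (n : Int) := by push_cast; ring
      rw [harith, PySem.List.pyRange_neg_one_cons (by exact_mod_cast Int.natCast_nonneg n |>.trans_lt' (by norm_num))]
      by_cases hr : r ≤ 0
      · have hr' : r = 0 := le_antisymm hr hr0
        subst hr'
        simp only [pvLoopA, if_pos le_rfl, Int.toNat_zero, Nat.sub_zero]
        rw [List.take_of_length_le (by omega), List.drop_of_length_le (by omega)]
        simp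
      · rcases l.eq_nil_or_concat with rfl | ⟨front, x, rfl⟩
        · simp at hl
        · simp only [List.concat_eq_append] at hl ⊢
          have hfl : front.length = n := by simp at hl; omega
          simp only [pvLoopA, if_neg hr]
          rw [show ((n : Int)).toNat = n from Int.toNat_natCast n, ← hfl, pvIncAt_concat front x, hfl]
          rw [pvLoopA_append _ front [x + 1] (r - 1) ?_]
          · rw [ih front (r - 1) hfl (by omega) (by omega)]
            have hrt : 1 ≤ r.toNat := by omega
            have hrtn : r.toNat ≤ n + 1 := by omega
            have hk : n - (r - 1).toNat = n + 1 - r.toNat := by omega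
            rw [hk]
            rw [List.take_append_of_le_length (by omega), List.drop_append_of_le_length (by omega)]
            simp [List.append_assoc]
          · intro i hi
            have hmem := (PySem.List.mem_pyRange_neg_one).1 hi
            constructor
            · omega
            · rw [hfl]; omega

-- the greedy loop computes the balanced split (divisor m+1 throughout)
lemma pvLoopB_desc (m : Nat) (r : Int) :
    pvLoopB (m + 1) r
      = (List.replicate (m + 1 - (r % ((m : Int) + 1)).toNat) (r / ((m : Int) + 1))
          ++ List.replicate (r % ((m : Int) + 1)).toNat (r / ((m : Int) + 1) + 1)).map
          (fun v => max 1 (min 3 v)) := by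
  induction m generalizing r with
  | zero =>
      simp [pvLoopB, PySem.Int.floordiv]
  | succ m ih =>
      set M : Int := (m : Int) + 2 with hM
      have hM0 : (0 : Int) < M := by omega
      set q : Int := r / M with hq
      set s : Int := r % M with hs
      have hs0 : 0 ≤ s := by rw [hs]; exact Int.emod_nonneg r (by omega)
      have hsM : s < M := by rw [hs]; exact Int.emod_lt_of_pos r hM0
      have hrq : r - q = s + q * ((m : Int) + 1) := by
        have h := Int.ediv_add_emod r M
        rw [← hq, ← hs, hM] at h
        linear_combination -h
      have hfloor : PySem.Int.floordiv r ((m : Int) + 1 + 1) = q := by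
        rw [show (m : Int) + 1 + 1 = M from by rw [hM]; ring,
          PySem.Int.floordiv_eq_ediv_of_pos hM0, hq]
      show max 1 (min 3 (PySem.Int.floordiv r ((m : Int) + 1 + 1))) :: pvLoopB (m + 1) (r - PySem.Int.floordiv r ((m : Int) + 1 + 1)) = _
      rw [hfloor, ih (r - q), hrq]
      rw [show ((m + 1 : Nat) : Int) + 1 = M from by rw [hM]; push_cast; ring, ← hq, ← hs]
      by_cases hcase : s < (m : Int) + 1
      · have hdiv : (s + q * ((m : Int) + 1)) / ((m : Int) + 1) = q := by
          rw [Int.add_mul_ediv_right _ _ (by omega : ((m : Int) + 1) ≠ 0),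
            Int.ediv_eq_zero_of_lt hs0 hcase, zero_add]
        have hmod : (s + q * ((m : Int) + 1)) % ((m : Int) + 1) = s := by
          rw [Int.add_mul_emod_self_right, Int.emod_eq_of_lt hs0 hcase]
        rw [hdiv, hmod]
        have hrepl : m + 1 + 1 - s.toNat = (m + 1 - s.toNat) + 1 := by omega
        rw [hrepl, List.replicate_succ]
        simp
      · have hfac : s + q * ((m : Int) + 1) = (q + 1) * ((m : Int) + 1) := by
          have hseq : s = (m : Int) + 1 := by omega
          rw [hseq]; ring
        have hdiv : (s + q * ((m : Int) + 1)) / ((m : Int) + 1) = q + 1 := by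
          rw [hfac, Int.mul_ediv_cancel _ (by omega : ((m : Int) + 1) ≠ 0)]
        have hmod : (s + q * ((m : Int) + 1)) % ((m : Int) + 1) = 0 := by
          rw [hfac, Int.mul_emod_left]
        rw [hdiv, hmod, show s.toNat = m + 1 from by omega]
        simp [List.replicate_succ]

-- ===== VERDICT (by name: the statement is the Claim_ definition above) =====
theorem progress_schedule_py_spec : Claim_equal_progress_schedule_py := by
  intro t b _ hb
  unfold Spec_progress_schedule_py progress_schedule_py progress_schedule_py_alt
  dsimp only
  rcases lt_trichotomy b 0 with hneg | rfl | hpos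
  · rw [PySem.List.pyRange_neg_one_eq_nil (by omega)]
    simp [pvLoopA, Int.toNat_of_nonpos hneg.le, pvLoopB]
  · exact absurd rfl hb
  · obtain ⟨m, hm⟩ : ∃ m : Nat, b.toNat = m + 1 := ⟨b.toNat - 1, by omega⟩
    have hbn : b = ((m : Int) + 1) := by omega
    have hr0 : 0 ≤ PySem.Int.mod t b := by
      rw [PySem.Int.mod_eq_emod_of_pos hpos]; exact Int.emod_nonneg t (by omega)
    have hrb : PySem.Int.mod t b < b := by
      rw [PySem.Int.mod_eq_emod_of_pos hpos]; exact Int.emod_lt_of_pos t hpos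
    rw [hm, pvLoopB_desc m t]
    have hA : b - 1 = ((m + 1 : Nat) : Int) - 1 := by push_cast; omega
    rw [hA, pvLoopA_desc (m + 1) _ (PySem.Int.mod t b) (by simp) hr0 (by push_cast; omega)]
    rw [List.take_replicate, List.drop_replicate, List.map_replicate]
    have hfd : PySem.Int.floordiv t b = t / ((m : Int) + 1) := by
      rw [PySem.Int.floordiv_eq_ediv_of_pos hpos, hbn]
    have hmd : PySem.Int.mod t b = t % ((m : Int) + 1) := by
      rw [PySem.Int.mod_eq_emod_of_pos hpos, hbn]
    have hle : (PySem.Int.mod t b).toNat ≤ m + 1 := by omega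
    have hmin : min (m + 1 - (PySem.Int.mod t b).toNat) (m + 1) = m + 1 - (PySem.Int.mod t b).toNat := by omega
    have hsub : m + 1 - (m + 1 - (PySem.Int.mod t b).toNat) = (PySem.Int.mod t b).toNat := by omega
    rw [hmin, hsub, hfd, hmd, List.map_append]
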